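-- pv_equiv track=rewrite | github.com/SIGSWAG/WebSemantique | appli/gen_uri/gen_uri.py | delete_spaces
-- ===== SOURCE A (Python) =====
-- def delete_spaces(text):
--     clean_text = ''
--     prev = 'a'
--     for i in text:
--         if ((i == ' ' and prev != ' ') or i != ' '):
--             clean_text += i
--             prev = i
--     return clean_text
-- ===== SOURCE B (Python) =====
-- def delete_spaces(text):
--     # Pairwise lookahead: keep every char except a space that is followed by
--     # another space; the last char (no successor) is always kept.
--     kept = [c for c, nxt in zip(text, text[1:]) if not (c == ' ' and nxt == ' ')]
--     return ''.join(kept) + text[-1:]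
-- ===== Notes on version B (the rewrite author's own statement) =====
-- stated objective: idiomatic
-- what changed: Replaced A's stateful prev-tracking loop with a stateless pairwise-lookahead filter: zip each character with its successor, drop a space whose successor is a space, and always keep the last character.
import Mathlib
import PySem

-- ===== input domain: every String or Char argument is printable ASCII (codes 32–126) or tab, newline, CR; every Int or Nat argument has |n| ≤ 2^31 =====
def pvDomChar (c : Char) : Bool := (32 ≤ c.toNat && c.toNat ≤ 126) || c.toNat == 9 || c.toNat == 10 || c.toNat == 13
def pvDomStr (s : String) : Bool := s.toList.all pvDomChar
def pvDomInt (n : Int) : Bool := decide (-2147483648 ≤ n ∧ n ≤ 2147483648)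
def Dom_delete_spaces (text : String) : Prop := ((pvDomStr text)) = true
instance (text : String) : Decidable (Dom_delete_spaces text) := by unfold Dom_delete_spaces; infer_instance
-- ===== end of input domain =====

-- B replaces A's prev-tracking state machine by a stateless pairwise-lookahead
-- filter (zip with the shifted string); objective: idiomatic, same cost.

-- ===== PORT A =====
def delete_spaces (text : String) : String :=
  String.ofList
    ((text.toList.foldl
      (fun (st : List Char × Char) i =>
        if (i = ' ' ∧ st.2 ≠ ' ') ∨ i ≠ ' ' then (st.1 ++ [i], i) else st)
      ([], 'a')).1)

-- ===== PORT B =====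
def delete_spaces_alt (text : String) : String :=
  -- zip(text, text[1:]) with the lookahead filter; text[-1:] appended at the end
  String.ofList
    ((((text.toList.zip (PySem.List.slice text.toList (some 1) none)).filter
        (fun p => ¬(p.1 = ' ' ∧ p.2 = ' '))).map Prod.fst)
      ++ PySem.List.slice text.toList (some (-1)) none)

-- ===== PRECONDITION & SPEC =====
def Spec_delete_spaces (text : String) (out : String) : Prop := out = delete_spaces_alt text
instance (text : String) (out : String) : Decidable (Spec_delete_spaces text out) := by unfold Spec_delete_spaces; infer_instance

-- ===== CLAIM (what is proved, stated in full; the proofs are below) =====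
def Claim_equal_delete_spaces : Prop := ∀ (text : String), Dom_delete_spaces text → Spec_delete_spaces text (delete_spaces text)

-- ===== LEMMAS AND PROOFS =====

-- recursive rendering of A's loop
def aGo (prev : Char) : List Char → List Char
  | [] => []
  | i :: rest => if (i = ' ' ∧ prev ≠ ' ') ∨ i ≠ ' ' then i :: aGo i rest else aGo prev rest

-- recursive rendering of B's pairwise-lookahead filter
def bGo : List Char → List Char
  | [] => []
  | [c] => [c]
  | c :: d :: rest => if c = ' ' ∧ d = ' ' then bGo (d :: rest) else c :: bGo (d :: rest)

theorem foldA (l : List Char) (acc : List Char) (prev : Char) :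
    (l.foldl
      (fun (st : List Char × Char) i =>
        if (i = ' ' ∧ st.2 ≠ ' ') ∨ i ≠ ' ' then (st.1 ++ [i], i) else st)
      (acc, prev)).1 = acc ++ aGo prev l := by
  induction l generalizing acc prev with
  | nil => simp [aGo]
  | cons c t ih =>
    simp only [List.foldl, aGo]
    split_ifs with h
    · rw [ih]; simp
    · rw [ih]

theorem bEq (l : List Char) :
    ((l.zip l.tail).filter (fun p => ¬(p.1 = ' ' ∧ p.2 = ' '))).map Prod.fst
      ++ l.drop (l.length - 1) = bGo l := by
  induction l using bGo.induct with
  | case1 => simp [bGo]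
  | case2 c => simp [bGo]
  | case3 c d rest h ih =>
    simp only [List.length_cons, Nat.add_sub_cancel, List.tail_cons, List.zip_cons_cons,
      List.filter_cons, List.drop_succ_cons] at ih ⊢
    rw [if_neg (by simp [h.1, h.2]),
      show bGo (c :: d :: rest) = bGo (d :: rest) by simp [bGo, h.1, h.2]]
    exact ih
  | case4 c d rest h ih =>
    simp only [List.length_cons, Nat.add_sub_cancel, List.tail_cons, List.zip_cons_cons,
      List.filter_cons, List.drop_succ_cons] at ih ⊢
    rw [if_pos (by simp; tauto)]
    simp only [List.map_cons, List.cons_append]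
    rw [show bGo (c :: d :: rest) = c :: bGo (d :: rest) by simp [bGo, h]]
    exact congrArg (_ :: ·) ih

theorem abEq (l : List Char) :
    (∀ prev, prev ≠ ' ' → aGo prev l = bGo l) ∧
    (' ' :: aGo ' ' l = bGo (' ' :: l)) ∧
    (l.head? ≠ some ' ' → aGo ' ' l = bGo l) := by
  induction l with
  | nil => refine ⟨fun _ _ => rfl, rfl, fun _ => rfl⟩
  | cons c t ih =>
    obtain ⟨P, Q, R⟩ := ih
    refine ⟨?_, ?_, ?_⟩
    · intro prev hprev
      have hcond : (c = ' ' ∧ prev ≠ ' ') ∨ c ≠ ' ' := by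
        by_cases hc : c = ' ' <;> simp [hc, hprev]
      simp only [aGo, if_pos hcond]
      match t with
      | [] => simp [aGo, bGo]
      | d :: t' =>
        by_cases hcd : c = ' ' ∧ d = ' '
        · obtain ⟨hc, hdd⟩ := hcd
          subst hc
          exact Q.trans (by simp [bGo, hdd])
        · rw [show bGo (c :: d :: t') = c :: bGo (d :: t') by simp [bGo, hcd]]
          by_cases hc : c = ' '
          · subst hc
            have hdne : d ≠ ' ' := by
              intro hdd; exact hcd ⟨rfl, hdd⟩
            exact congrArg (_ :: ·) (R (by simp [hdne]))
          · exact congrArg (_ :: ·) (P c hc)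
    · by_cases hc : c = ' '
      · subst hc
        rw [show aGo ' ' (' ' :: t) = aGo ' ' t by simp [aGo]]
        rw [show bGo (' ' :: ' ' :: t) = bGo (' ' :: t) by simp [bGo]]
        exact Q
      · rw [show aGo ' ' (c :: t) = c :: aGo c t by simp [aGo, hc]]
        rw [show bGo (' ' :: c :: t) = ' ' :: bGo (c :: t) by simp [bGo, hc]]
        refine congrArg (_ :: ·) ?_
        match t with
        | [] => simp [aGo, bGo]
        | d :: t' =>
          rw [show bGo (c :: d :: t') = c :: bGo (d :: t') by simp [bGo, hc]]
          exact congrArg (_ :: ·) (P c hc)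
    · intro hhd
      have hc : c ≠ ' ' := by simpa using hhd
      rw [show aGo ' ' (c :: t) = c :: aGo c t by simp [aGo, hc]]
      match t with
      | [] => simp [aGo, bGo]
      | d :: t' =>
        rw [show bGo (c :: d :: t') = c :: bGo (d :: t') by simp [bGo, hc]]
        exact congrArg (_ :: ·) (P c hc)

-- ===== VERDICT (by name: the statement is the Claim_ definition above) =====
theorem delete_spaces_spec : Claim_equal_delete_spaces := by
  intro text _
  unfold Spec_delete_spaces delete_spaces delete_spaces_alt
  rw [foldA]
  rw [PySem.List.slice_from_one, PySem.List.slice_from_neg_one, bEq]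
  simp only [List.nil_append]
  exact congrArg String.ofList ((abEq text.toList).1 'a' (by decide))
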